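-- pv_equiv track=rewrite | github.com/CaCOsses/CodeWars | Data Reverse/main.py | data_reverse
-- ===== SOURCE A (Python) =====
-- def data_reverse(data):
--     a=int(len(data)/8)
--     c=([])
--     for i in range (a,0,-1):
--         b=data[8*(i-1):8*i]
--         if b!=[]:
--             c=c+b
--     return(c)
-- ===== SOURCE B (Python) =====
-- def data_reverse(data):
--     if len(data) < 8:
--         return []
--     return data_reverse(data[8:]) + data[:8]
-- ===== Notes on version B (the rewrite author's own statement) =====
-- stated objective: alternative
-- what changed: B is a structural recursion that peels the first complete 8-element block off the front and appends it after the recursively reversed rest, instead of A's down-counting index loop that slices blocks back-to-front and concatenates them into an accumulator.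
import Mathlib
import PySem

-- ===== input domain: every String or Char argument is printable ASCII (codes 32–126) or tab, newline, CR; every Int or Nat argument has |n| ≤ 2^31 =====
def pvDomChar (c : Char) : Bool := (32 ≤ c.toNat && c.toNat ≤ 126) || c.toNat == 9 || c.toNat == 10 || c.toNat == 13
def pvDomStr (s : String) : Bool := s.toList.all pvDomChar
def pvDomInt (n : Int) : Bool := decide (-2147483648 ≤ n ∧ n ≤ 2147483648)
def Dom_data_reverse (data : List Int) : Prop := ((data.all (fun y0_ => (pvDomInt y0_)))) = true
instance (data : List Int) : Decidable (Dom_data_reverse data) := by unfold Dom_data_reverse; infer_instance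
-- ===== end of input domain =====

-- B replaces A's back-to-front index loop by a structural recursion peeling the first complete
-- 8-element block off the front (objective: alternative decomposition; same asymptotic cost).

-- ===== PORT A =====
def data_reverse (data : List Int) : List Int :=
  -- a = int(len(data)/8): truncation of a nonnegative exact float quotient = floor division
  let a : Int := PySem.Int.floordiv (data.length : Int) 8
  (PySem.List.pyRange a 0 (-1)).foldl
    (fun c i =>
      let b := PySem.List.slice data (some (8 * (i - 1))) (some (8 * i))
      if b ≠ [] then c ++ b else c) []

-- ===== PORT B =====
def data_reverse_alt (data : List Int) : List Int :=
  if data.length < 8 then []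
  else data_reverse_alt (PySem.List.slice data (some 8) none) ++ PySem.List.slice data none (some 8)
termination_by data.length
decreasing_by
  rw [PySem.List.slice_from data (by norm_num : (0:Int) ≤ 8)]
  simp
  omega

-- ===== PRECONDITION & SPEC =====
def Spec_data_reverse (data : List Int) (out : List Int) : Prop := out = data_reverse_alt data
instance (data : List Int) (out : List Int) : Decidable (Spec_data_reverse data out) := by unfold Spec_data_reverse; infer_instance

-- ===== CLAIM (what is proved, stated in full; the proofs are below) =====
def Claim_equal_data_reverse : Prop := ∀ (data : List Int), Dom_data_reverse data → Spec_data_reverse data (data_reverse data)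

-- ===== LEMMAS AND PROOFS =====

-- A's loop body always extends the accumulator (c ++ [] = c), so the if is redundant.
theorem data_reverse_step (data : List Int) (c : List Int) (i : Int) :
    (let b := PySem.List.slice data (some (8 * (i - 1))) (some (8 * i))
     if b ≠ [] then c ++ b else c) =
    c ++ PySem.List.slice data (some (8 * (i - 1))) (some (8 * i)) := by
  by_cases h : PySem.List.slice data (some (8 * (i - 1))) (some (8 * i)) = [] <;> simp [h]

theorem data_reverse_eq_flatMap (data : List Int) :
    data_reverse data =
      (PySem.List.pyRange ((data.length / 8 : Nat) : Int) 0 (-1)).flatMap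
        (fun i => PySem.List.slice data (some (8 * (i - 1))) (some (8 * i))) := by
  unfold data_reverse
  have ha : PySem.Int.floordiv (data.length : Int) 8 = ((data.length / 8 : Nat) : Int) := by
    rw [show (8 : Int) = ((8 : Nat) : Int) from rfl, PySem.Int.floordiv_natCast]
  rw [ha,
    PySem.List.foldl_congr_mem _ _
      (fun c i => c ++ PySem.List.slice data (some (8 * (i - 1))) (some (8 * i))) _
      (fun acc x _ => data_reverse_step data acc x)]
  exact (PySem.List.foldl_append_eq_flatMap _ _ []).trans (List.nil_append _)

-- A as a flatten over List.range: chunk k (counting from the back) of the complete-block region.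
theorem data_reverse_eq_flatten (data : List Int) :
    data_reverse data =
      ((List.range (data.length / 8)).map
        (fun k => (data.drop (8 * (data.length / 8 - k - 1))).take 8)).flatten := by
  rw [data_reverse_eq_flatMap, List.flatMap_def, PySem.List.pyRange_neg_one, List.map_map]
  set n : Nat := data.length / 8 with hn
  have hnn : (((n : Int) - 0).toNat) = n := by omega
  rw [hnn]
  apply congrArg List.flatten
  apply List.map_congr_left
  intro k hk
  rw [List.mem_range] at hk
  simp only [Function.comp]
  have h1 : (8 * ((n : Int) - k - 1)) = ((8 * (n - k - 1) : Nat) : Int) := by push_cast; omega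
  have h2 : (8 * ((n : Int) - k)) = ((8 * (n - k - 1) + 8 : Nat) : Int) := by push_cast; omega
  rw [h1, h2, PySem.List.slice_natCast]
  congr 1
  omega

-- Peeling the last element of List.range: A on data with ≥ 8 elements = A on the tail-after-8 ++ first 8.
theorem data_reverse_peel (data : List Int) (h : 8 ≤ data.length) :
    data_reverse data = data_reverse (data.drop 8) ++ data.take 8 := by
  rw [data_reverse_eq_flatten, data_reverse_eq_flatten]
  obtain ⟨m, hm2⟩ : ∃ m, data.length / 8 = m + 1 := ⟨data.length / 8 - 1, by omega⟩
  have hm : (data.drop 8).length / 8 = m := by simp; omega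
  rw [hm, hm2, List.range_succ, List.map_append, List.flatten_append]
  congr 1
  · apply congrArg List.flatten
    apply List.map_congr_left
    intro k hk
    rw [List.mem_range] at hk
    rw [List.drop_drop, show 8 + 8 * (m - k - 1) = 8 * (m + 1 - k - 1) from by omega]
  · simp only [List.map_cons, List.map_nil, List.flatten_cons, List.flatten_nil, List.append_nil]
    rw [show 8 * (m + 1 - m - 1) = 0 from by omega, List.drop_zero]

theorem data_reverse_eq_alt (data : List Int) : data_reverse data = data_reverse_alt data := by
  induction hN : data.length using Nat.strong_induction_on generalizing data with
  | _ N ih =>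
    rw [data_reverse_alt.eq_def]
    by_cases h : data.length < 8
    · rw [if_pos h, data_reverse_eq_flatten,
        show data.length / 8 = 0 by omega]
      simp
    · rw [if_neg h]
      rw [not_lt] at h
      rw [PySem.List.slice_from data (by norm_num : (0:Int) ≤ 8),
        PySem.List.slice_to data (by norm_num : (0:Int) ≤ 8),
        show ((8:Int).toNat) = 8 from rfl]
      rw [data_reverse_peel data h]
      congr 1
      exact ih (data.drop 8).length (by simp; omega) _ rfl

-- ===== VERDICT (by name: the statement is the Claim_ definition above) =====
theorem data_reverse_spec : Claim_equal_data_reverse := by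
  intro data _
  exact data_reverse_eq_alt data
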